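-- pv_equiv track=rewrite | github.com/Scramocell/NEA | marble.py | __mask_locations
-- ===== SOURCE A (Python) =====
-- def __mask_locations(x_coord, y_coord, locations):
--     '''Returns the locations that could be hopped to'''
--
--     mask_locations = []
--
--     #The locations are every second space
--     #This extends from the marble location to the edges of the board
--
--     for mask_x in range(x_coord-16, 17+x_coord, 2):
--         for mask_y in range(y_coord-16, 17+y_coord, 2):
--             masked = (mask_x, mask_y)
--
--             if masked in locations:
--                 mask_locations.append(masked)
--
--     return mask_locations
-- ===== SOURCE B (Python) =====
-- def __mask_locations(x_coord, y_coord, locations):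
--     '''Returns the locations that could be hopped to'''
--     reachable = set()
--     for (lx, ly) in locations:
--         if abs(lx - x_coord) <= 16 and (lx - x_coord) % 2 == 0 \
--            and abs(ly - y_coord) <= 16 and (ly - y_coord) % 2 == 0:
--             reachable.add((lx, ly))
--     return sorted(reachable)
-- ===== Notes on version B (the rewrite author's own statement) =====
-- stated objective: faster
-- what changed: Instead of scanning all 289 grid cells and testing each for membership in locations, B makes one pass over locations keeping points whose offset from (x_coord, y_coord) is even and within 16 in both axes, dedupes them in a set, and returns them sorted by (x, y), which is exactly A's grid-scan order.
import Mathlib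
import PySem

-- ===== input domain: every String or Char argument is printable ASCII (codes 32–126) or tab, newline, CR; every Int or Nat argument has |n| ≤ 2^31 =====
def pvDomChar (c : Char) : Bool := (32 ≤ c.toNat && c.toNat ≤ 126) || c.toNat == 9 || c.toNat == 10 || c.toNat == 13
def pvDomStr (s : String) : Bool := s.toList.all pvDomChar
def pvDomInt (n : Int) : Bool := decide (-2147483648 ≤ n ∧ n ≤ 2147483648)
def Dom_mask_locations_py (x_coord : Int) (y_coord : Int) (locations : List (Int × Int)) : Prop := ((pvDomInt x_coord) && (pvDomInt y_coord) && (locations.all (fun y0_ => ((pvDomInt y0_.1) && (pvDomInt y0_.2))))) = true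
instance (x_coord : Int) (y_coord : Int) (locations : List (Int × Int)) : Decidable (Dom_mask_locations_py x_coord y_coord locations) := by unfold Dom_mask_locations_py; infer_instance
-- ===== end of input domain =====

-- B replaces A's 289-cell grid scan (each cell tested for membership in `locations`)
-- by one filtering pass over `locations` plus a dedup and a lexicographic sort (objective: faster).

-- ===== PORT A =====
def mask_locations_py (x_coord : Int) (y_coord : Int) (locations : List (Int × Int)) : List (Int × Int) :=
  (PySem.List.pyRange (x_coord - 16) (17 + x_coord) 2).foldl (fun acc mask_x =>
    (PySem.List.pyRange (y_coord - 16) (17 + y_coord) 2).foldl (fun acc2 mask_y =>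
      let masked := (mask_x, mask_y)
      if masked ∈ locations then acc2 ++ [masked] else acc2) acc) []

-- ===== PORT B =====
def mask_locations_py_alt (x_coord : Int) (y_coord : Int) (locations : List (Int × Int)) : List (Int × Int) :=
  let reachable : PySem.Set (Int × Int) := PySem.Set.ofList (locations.filter (fun p =>
    decide (|p.1 - x_coord| ≤ 16) && decide (PySem.Int.mod (p.1 - x_coord) 2 = 0) &&
    decide (|p.2 - y_coord| ≤ 16) && decide (PySem.Int.mod (p.2 - y_coord) 2 = 0)))
  PySem.List.sorted2 reachable Prod.fst Prod.snd

-- ===== PRECONDITION & SPEC =====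
def Spec_mask_locations_py (x_coord : Int) (y_coord : Int) (locations : List (Int × Int)) (out : List (Int × Int)) : Prop := out = mask_locations_py_alt x_coord y_coord locations
instance (x_coord : Int) (y_coord : Int) (locations : List (Int × Int)) (out : List (Int × Int)) : Decidable (Spec_mask_locations_py x_coord y_coord locations out) := by unfold Spec_mask_locations_py; infer_instance

-- ===== CLAIM (what is proved, stated in full; the proofs are below) =====
def Claim_equal_mask_locations_py : Prop := ∀ (x_coord : Int) (y_coord : Int) (locations : List (Int × Int)), Dom_mask_locations_py x_coord y_coord locations → Spec_mask_locations_py x_coord y_coord locations (mask_locations_py x_coord y_coord locations)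

-- ===== LEMMAS AND PROOFS =====

-- strict lexicographic order on pairs of integers, and the Bool comparator sorted2 uses
def pvLexLt (a b : Int × Int) : Prop := a.1 < b.1 ∨ (a.1 = b.1 ∧ a.2 < b.2)
def pvBlt (a b : Int × Int) : Bool := decide (a.1 < b.1) || (!decide (b.1 < a.1) && decide (a.2 < b.2))

lemma pvBlt_false_iff (a b : Int × Int) : pvBlt a b = false ↔ ¬ pvLexLt a b := by
  simp [pvBlt, pvLexLt]; omega

-- insertBy with pvBlt preserves "pairwise not-greater"
lemma pvInsertBy_pairwise (x : Int × Int) (ys : List (Int × Int))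
    (h : ys.Pairwise (fun u v => pvBlt v u = false)) :
    (PySem.List.insertBy pvBlt x ys).Pairwise (fun u v => pvBlt v u = false) := by
  induction ys with
  | nil => simp [PySem.List.insertBy]
  | cons y ys ih =>
    rw [List.pairwise_cons] at h
    by_cases hxy : pvBlt x y = true
    · rw [show PySem.List.insertBy pvBlt x (y :: ys) = x :: y :: ys by
        simp [PySem.List.insertBy, hxy]]
      refine List.Pairwise.cons ?_ (List.Pairwise.cons h.1 h.2)
      intro z hz
      rcases List.mem_cons.mp hz with rfl | hz
      · rw [pvBlt_false_iff]; revert hxy; simp [pvBlt, pvLexLt]; omega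
      · have hyz := h.1 z hz
        rw [pvBlt_false_iff] at hyz ⊢
        revert hxy hyz; simp [pvBlt, pvLexLt]; omega
    · rw [show PySem.List.insertBy pvBlt x (y :: ys) = y :: PySem.List.insertBy pvBlt x ys by
        simp [PySem.List.insertBy, hxy]]
      refine List.Pairwise.cons ?_ (ih h.2)
      intro z hz
      rcases (PySem.List.mem_insertBy pvBlt x z ys).mp hz with rfl | hz
      · simpa using hxy
      · exact h.1 z hz
lemma pvFoldl_pairwise (xs acc : List (Int × Int))
    (h : acc.Pairwise (fun u v => pvBlt v u = false)) :
    (xs.foldl (fun acc x => PySem.List.insertBy pvBlt x acc) acc).Pairwise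
      (fun u v => pvBlt v u = false) := by
  induction xs generalizing acc with
  | nil => simpa using h
  | cons x xs ih => exact ih _ (pvInsertBy_pairwise x acc h)

lemma pvSorted2_eq_foldl (s : List (Int × Int)) :
    PySem.List.sorted2 s Prod.fst Prod.snd =
      s.foldl (fun acc x => PySem.List.insertBy pvBlt x acc) [] := rfl

-- A's loop written as filter-of-grid
lemma pvA_eq_flatMap (x y : Int) (locs : List (Int × Int)) :
    mask_locations_py x y locs =
      (PySem.List.pyRange (x - 16) (17 + x) 2).flatMap (fun mx =>
        ((PySem.List.pyRange (y - 16) (17 + y) 2).filter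
          (fun my => decide ((mx, my) ∈ locs))).map (fun my => (mx, my))) := by
  unfold mask_locations_py
  have h1 : ∀ (acc : List (Int × Int)) (mx : Int),
      (PySem.List.pyRange (y - 16) (17 + y) 2).foldl (fun acc2 my =>
        if (mx, my) ∈ locs then acc2 ++ [(mx, my)] else acc2) acc =
      acc ++ ((PySem.List.pyRange (y - 16) (17 + y) 2).filter
          (fun my => decide ((mx, my) ∈ locs))).map (fun my => (mx, my)) := by
    intro acc mx
    exact PySem.List.foldl_append_ite (fun my => (mx, my) ∈ locs) (fun my => (mx, my)) _ acc
  simp only [h1]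
  simpa using PySem.List.foldl_append_eq_flatMap
    (fun mx => ((PySem.List.pyRange (y - 16) (17 + y) 2).filter
      (fun my => decide ((mx, my) ∈ locs))).map (fun my => (mx, my)))
    (PySem.List.pyRange (x - 16) (17 + x) 2) []

-- the filter condition of B, as a Prop
def pvCond (x y : Int) (p : Int × Int) : Prop :=
  |p.1 - x| ≤ 16 ∧ PySem.Int.mod (p.1 - x) 2 = 0 ∧ |p.2 - y| ≤ 16 ∧ PySem.Int.mod (p.2 - y) 2 = 0

lemma pvMem_A (x y : Int) (locs : List (Int × Int)) (p : Int × Int) :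
    p ∈ mask_locations_py x y locs ↔ p ∈ locs ∧ pvCond x y p := by
  rw [pvA_eq_flatMap]
  simp only [List.mem_flatMap, List.mem_map, List.mem_filter,
    PySem.List.mem_pyRange_iff_of_pos (by norm_num : (0:Int) < 2), decide_eq_true_eq]
  constructor
  · rintro ⟨mx, ⟨hx1, hx2, hx3⟩, my, ⟨⟨hy1, hy2, hy3⟩, hmem⟩, rfl⟩
    refine ⟨hmem, ?_⟩
    simp only [pvCond, PySem.Int.mod_eq_zero_iff_dvd, abs_le]
    omega
  · rintro ⟨hmem, hc⟩
    simp only [pvCond, PySem.Int.mod_eq_zero_iff_dvd, abs_le] at hc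
    exact ⟨p.1, by omega, p.2, ⟨by omega, by simpa using hmem⟩, rfl⟩

lemma pvMem_S (x y : Int) (locs : List (Int × Int)) (p : Int × Int) :
    p ∈ PySem.Set.ofList (locs.filter (fun p =>
      decide (|p.1 - x| ≤ 16) && decide (PySem.Int.mod (p.1 - x) 2 = 0) &&
      decide (|p.2 - y| ≤ 16) && decide (PySem.Int.mod (p.2 - y) 2 = 0)))
    ↔ p ∈ locs ∧ pvCond x y p := by
  rw [PySem.Set.mem_ofList]
  simp [pvCond, and_assoc]

-- A's output is strictly increasing in lexicographic order
lemma pvPairwise_A (x y : Int) (locs : List (Int × Int)) :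
    (mask_locations_py x y locs).Pairwise pvLexLt := by
  rw [pvA_eq_flatMap]
  rw [List.pairwise_flatMap]
  have hstep : ∀ a b : Int, (PySem.List.pyRange a b 2).Pairwise (· < ·) := by
    intro a b
    rw [PySem.List.pyRange_of_pos a b (by norm_num)]
    rw [List.pairwise_map]
    exact List.pairwise_lt_range.imp (by intro u v h; omega)
  constructor
  · intro mx _
    rw [List.pairwise_map]
    refine ((hstep _ _).filter _).imp ?_
    intro u v h
    exact Or.inr ⟨rfl, h⟩
  · refine (hstep _ _).imp ?_
    intro mx mx' h p hp q hq
    simp only [List.mem_map, List.mem_filter] at hp hq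
    obtain ⟨my, _, rfl⟩ := hp
    obtain ⟨my', _, rfl⟩ := hq
    exact Or.inl h

lemma pvLexLt_irrefl (p : Int × Int) : ¬ pvLexLt p p := by simp [pvLexLt]

lemma pvNodup_A (x y : Int) (locs : List (Int × Int)) :
    (mask_locations_py x y locs).Nodup :=
  (pvPairwise_A x y locs).imp (by intro a b h hab; subst hab; exact pvLexLt_irrefl _ h)

-- B's output is strictly increasing in lexicographic order
lemma pvPairwise_B (x y : Int) (locs : List (Int × Int)) :
    (mask_locations_py_alt x y locs).Pairwise pvLexLt := by
  unfold mask_locations_py_alt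
  set S := PySem.Set.ofList (locs.filter (fun p =>
    decide (|p.1 - x| ≤ 16) && decide (PySem.Int.mod (p.1 - x) 2 = 0) &&
    decide (|p.2 - y| ≤ 16) && decide (PySem.Int.mod (p.2 - y) 2 = 0))) with hS
  have hnd : (PySem.List.sorted2 S Prod.fst Prod.snd).Nodup :=
    (PySem.List.sorted2_perm S Prod.fst Prod.snd false).nodup_iff.mpr (PySem.Set.nodup_ofList _)
  have hpw : (PySem.List.sorted2 S Prod.fst Prod.snd).Pairwise (fun u v => pvBlt v u = false) := by
    rw [pvSorted2_eq_foldl]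
    exact pvFoldl_pairwise S [] (by simp)
  refine (hpw.and hnd).imp ?_
  rintro a b ⟨hle, hne⟩
  rw [pvBlt_false_iff] at hle
  have : a ≠ b := hne
  simp only [pvLexLt] at hle ⊢
  rcases Prod.ext_iff.not.mp this with h
  by_contra hc
  simp only [not_or, not_and] at hc
  apply h
  constructor <;> omega

lemma pvMem_B (x y : Int) (locs : List (Int × Int)) (p : Int × Int) :
    p ∈ mask_locations_py_alt x y locs ↔ p ∈ locs ∧ pvCond x y p := by
  unfold mask_locations_py_alt
  rw [(PySem.List.sorted2_perm _ Prod.fst Prod.snd false).mem_iff]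
  exact pvMem_S x y locs p

-- ===== VERDICT (by name: the statement is the Claim_ definition above) =====
theorem mask_locations_py_spec : Claim_equal_mask_locations_py := by
  intro x y locs _
  unfold Spec_mask_locations_py
  have hndB : (mask_locations_py_alt x y locs).Nodup :=
    ((pvPairwise_B x y locs).imp (by intro a b h hab; subst hab; exact pvLexLt_irrefl _ h))
  have hperm : (mask_locations_py x y locs).Perm (mask_locations_py_alt x y locs) := by
    rw [List.perm_ext_iff_of_nodup (pvNodup_A x y locs) hndB]
    intro p
    rw [pvMem_A, pvMem_B]
  exact List.Perm.eq_of_pairwise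
    (by intro a b _ _ h1 h2; exfalso; simp only [pvLexLt] at h1 h2; omega)
    (pvPairwise_A x y locs) (pvPairwise_B x y locs) hperm
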